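-- pv_equiv track=rewrite | github.com/posl/comment_recommendation | script/mod_gen/4_time/zh/238_B/5.py | pizza_cut
-- ===== SOURCE A (Python) =====
-- def pizza_cut(n, a):
--     """切割比萨饼"""
--     ans = 0
--     for i in range(n):
--         for j in range(n):
--             if i == j:
--                 continue
--             ans = max(ans, abs(a[i] - a[j]))
--             ans = max(ans, 360 - abs(a[i] - a[j]))
--     return ans
-- ===== SOURCE B (Python) =====
-- def pizza_cut(n, a):
--     """切割比萨饼"""
--     if n <= 1:
--         return 0
--     vals = sorted(a[:n])
--     gap = min(y - x for x, y in zip(vals, vals[1:]))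
--     return max(vals[-1] - vals[0], 360 - gap)
-- ===== Notes on version B (the rewrite author's own statement) =====
-- stated objective: faster
-- what changed: B replaces A's O(n^2) scan over all index pairs by sorting the first n angles once and combining max-min with the minimum adjacent gap (answer = max(max-min, 360-min gap)).
import Mathlib
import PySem

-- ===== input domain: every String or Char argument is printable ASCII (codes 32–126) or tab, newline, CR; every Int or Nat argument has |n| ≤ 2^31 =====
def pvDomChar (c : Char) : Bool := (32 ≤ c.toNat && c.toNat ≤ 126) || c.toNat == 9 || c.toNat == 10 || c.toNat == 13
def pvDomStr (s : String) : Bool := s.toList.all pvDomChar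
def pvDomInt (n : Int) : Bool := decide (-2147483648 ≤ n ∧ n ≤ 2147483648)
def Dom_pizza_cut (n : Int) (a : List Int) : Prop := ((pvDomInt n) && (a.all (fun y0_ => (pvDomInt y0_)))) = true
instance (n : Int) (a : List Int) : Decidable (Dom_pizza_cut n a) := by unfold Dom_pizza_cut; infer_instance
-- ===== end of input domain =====

-- B replaces A's O(n^2) all-pairs scan by sort-then-adjacent-gaps: max(max-min, 360-min adjacent gap).

-- ===== PORT A =====
-- abs(a[i] - a[j]) as computed in A's inner loop body
def pcD (a : List Int) (i j : Int) : Int :=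
  |PySem.List.pyGetD a i 0 - PySem.List.pyGetD a j 0|

-- A's inner-loop body: 'if i == j: continue; ans = max(ans, d); ans = max(ans, 360 - d)'
def pcInner (a : List Int) (i : Int) (ans : Int) (j : Int) : Int :=
  if i = j then ans else max (max ans (pcD a i j)) (360 - pcD a i j)

def pizza_cut (n : Int) (a : List Int) : Int :=
  (PySem.List.pyRange 0 n).foldl
    (fun ans i => (PySem.List.pyRange 0 n).foldl (pcInner a i) ans) 0

-- ===== PORT B =====
def pizza_cut_alt (n : Int) (a : List Int) : Int :=
  if n ≤ 1 then 0
  else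
    let vals := PySem.List.sorted (PySem.List.slice a none (some n)) (fun x => x) false
    let gaps := (vals.zip vals.tail).map (fun p => p.2 - p.1)
    match PySem.List.min? gaps (fun x => x) with
    | none => 0  -- Python's min raises on an empty sequence; unreachable under Pre_
    | some gap =>
        max (PySem.List.pyGetD vals (-1) 0 - PySem.List.pyGetD vals 0 0) (360 - gap)

-- ===== PRECONDITION & SPEC =====
-- Pre_ excludes exactly the inputs where A raises IndexError: 2 ≤ n and a shorter than n.
def Pre_pizza_cut (n : Int) (a : List Int) : Prop := n ≤ 1 ∨ n ≤ (a.length : Int)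
instance (n : Int) (a : List Int) : Decidable (Pre_pizza_cut n a) := by
  unfold Pre_pizza_cut; infer_instance

def pvWitness_pizza_cut : Int × List Int := (3, [0, 100, 200])

def Spec_pizza_cut (n : Int) (a : List Int) (out : Int) : Prop := out = pizza_cut_alt n a
instance (n : Int) (a : List Int) (out : Int) : Decidable (Spec_pizza_cut n a out) := by
  unfold Spec_pizza_cut; infer_instance

-- ===== CLAIM (what is proved, stated in full; the proofs are below) =====
def Claim_equal_pizza_cut : Prop := ∀ (n : Int) (a : List Int), Dom_pizza_cut n a → Pre_pizza_cut n a → Spec_pizza_cut n a (pizza_cut n a)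


-- ===== LEMMAS AND PROOFS =====

-- A-side loop lemmas -------------------------------------------------------

lemma pc_inner_step_ge (a : List Int) (i ans j : Int) : ans ≤ pcInner a i ans j := by
  unfold pcInner
  split_ifs with h
  · exact le_refl _
  · exact le_trans (le_max_left _ _) (le_max_left _ _)

lemma pc_inner_ge (a : List Int) (i : Int) :
    ∀ (l : List Int) (ans : Int), ans ≤ l.foldl (pcInner a i) ans := by
  intro l
  induction l with
  | nil => intro ans; exact le_refl _
  | cons j l ih =>
      intro ans
      exact le_trans (pc_inner_step_ge a i ans j) (ih _)

lemma pc_inner_le (a : List Int) (i b : Int) :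
    ∀ (l : List Int) (ans : Int), ans ≤ b →
      (∀ j ∈ l, j ≠ i → pcD a i j ≤ b ∧ 360 - pcD a i j ≤ b) →
      l.foldl (pcInner a i) ans ≤ b := by
  intro l
  induction l with
  | nil => intro ans hans _; exact hans
  | cons j l ih =>
      intro ans hans h
      simp only [List.foldl_cons]
      apply ih
      · unfold pcInner
        split_ifs with hij
        · exact hans
        · have hj := h j (by simp) (fun e => hij e.symm)
          exact max_le (max_le hans hj.1) hj.2
      · intro k hk hki; exact h k (by simp [hk]) hki

lemma pc_inner_elem (a : List Int) (i : Int) :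
    ∀ (l : List Int) (ans j : Int), j ∈ l → j ≠ i →
      pcD a i j ≤ l.foldl (pcInner a i) ans ∧
      360 - pcD a i j ≤ l.foldl (pcInner a i) ans := by
  intro l
  induction l with
  | nil => intro ans j hj; simp at hj
  | cons k l ih =>
      intro ans j hj hji
      rcases List.mem_cons.mp hj with rfl | hj'
      · simp only [List.foldl_cons]
        have hstep : pcD a i j ≤ pcInner a i ans j ∧ 360 - pcD a i j ≤ pcInner a i ans j := by
          unfold pcInner
          rw [if_neg (fun e => hji e.symm)]
          exact ⟨le_trans (le_max_right _ _) (le_max_left _ _), le_max_right _ _⟩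
        exact ⟨le_trans hstep.1 (pc_inner_ge a i l _), le_trans hstep.2 (pc_inner_ge a i l _)⟩
      · simp only [List.foldl_cons]
        exact ih _ j hj' hji

lemma pc_outer_ge (a : List Int) (r : List Int) :
    ∀ (l : List Int) (ans : Int),
      ans ≤ l.foldl (fun ans i => r.foldl (pcInner a i) ans) ans := by
  intro l
  induction l with
  | nil => intro ans; exact le_refl _
  | cons i l ih =>
      intro ans
      exact le_trans (pc_inner_ge a i r ans) (ih _)

lemma pc_outer_le (a : List Int) (r : List Int) (b : Int) :
    ∀ (l : List Int) (ans : Int), ans ≤ b →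
      (∀ i ∈ l, ∀ j ∈ r, j ≠ i → pcD a i j ≤ b ∧ 360 - pcD a i j ≤ b) →
      l.foldl (fun ans i => r.foldl (pcInner a i) ans) ans ≤ b := by
  intro l
  induction l with
  | nil => intro ans hans _; exact hans
  | cons i l ih =>
      intro ans hans h
      simp only [List.foldl_cons]
      apply ih
      · exact pc_inner_le a i b r ans hans (fun j hj => h i (by simp) j hj)
      · intro i' hi' j hj hji; exact h i' (by simp [hi']) j hj hji

lemma pc_outer_elem (a : List Int) (r : List Int) :
    ∀ (l : List Int) (ans i j : Int), i ∈ l → j ∈ r → j ≠ i →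
      pcD a i j ≤ l.foldl (fun ans i => r.foldl (pcInner a i) ans) ans ∧
      360 - pcD a i j ≤ l.foldl (fun ans i => r.foldl (pcInner a i) ans) ans := by
  intro l
  induction l with
  | nil => intro ans i j hi; simp at hi
  | cons k l ih =>
      intro ans i j hi hj hji
      rcases List.mem_cons.mp hi with rfl | hi'
      · simp only [List.foldl_cons]
        have h1 := pc_inner_elem a i r ans j hj hji
        exact ⟨le_trans h1.1 (pc_outer_ge a r l _), le_trans h1.2 (pc_outer_ge a r l _)⟩
      · simp only [List.foldl_cons]
        exact ih _ i j hi' hj hji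

-- counting lemmas ----------------------------------------------------------

lemma two_le_count_of_pair {x : Int} :
    ∀ {l : List Int} {p q : ℕ} (hpq : p < q) (hq : q < l.length),
      l[p]'(Nat.lt_trans hpq hq) = x → l[q] = x → 2 ≤ l.count x := by
  intro l
  induction l with
  | nil => intro p q hpq hq; simp at hq
  | cons h tl ih =>
      intro p q hpq hq hp hqx
      match p, q with
      | 0, q + 1 =>
          simp only [List.getElem_cons_zero] at hp
          simp only [List.getElem_cons_succ] at hqx
          have hmem : x ∈ tl := by
            exact hqx ▸ List.getElem_mem _
          have := List.count_pos_iff.mpr hmem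
          simp [hp]
          omega
      | p + 1, q + 1 =>
          simp only [List.getElem_cons_succ] at hp hqx
          have := ih (by omega) (by simpa using hq) hp hqx
          simp [List.count_cons]
          omega

lemma exists_pair_of_two_le_count {x : Int} :
    ∀ {l : List Int}, 2 ≤ l.count x →
      ∃ p q, ∃ (hpq : p < q) (hq : q < l.length),
        l[p]'(Nat.lt_trans hpq hq) = x ∧ l[q] = x := by
  intro l
  induction l with
  | nil => intro h; simp at h
  | cons h tl ih =>
      intro hc
      by_cases hx : h = x
      · have h1 : 1 ≤ tl.count x := by
          simp [hx] at hc ⊢; omega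
        have hmem : x ∈ tl := List.count_pos_iff.mp (by omega)
        obtain ⟨q', hq', hqx⟩ := List.mem_iff_getElem.mp hmem
        exact ⟨0, q' + 1, Nat.succ_pos _, by simpa using hq', by simpa using hx, by simpa using hqx⟩
      · have h2 : 2 ≤ tl.count x := by
          simp [hx] at hc ⊢; omega
        obtain ⟨p, q, hpq, hq, hp, hqx⟩ := ih h2
        exact ⟨p + 1, q + 1, by omega, by simpa using hq, by simpa using hp, by simpa using hqx⟩

-- minimum-gap lemma on the sorted list --------------------------------------


lemma mingap_le (xs : List Int) (g : Int)
    (hg : PySem.List.min?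
        (((PySem.List.sorted xs (fun x => x) false).zip
          (PySem.List.sorted xs (fun x => x) false).tail).map (fun p => p.2 - p.1))
        (fun x => x) = some g)
    {p q : ℕ} (hpq : p < q) (hq : q < (PySem.List.sorted xs (fun x => x) false).length) :
    g ≤ (PySem.List.sorted xs (fun x => x) false)[q] -
        (PySem.List.sorted xs (fun x => x) false)[p]'(Nat.lt_trans hpq hq) := by
  set s := PySem.List.sorted xs (fun x => x) false with hs
  have hlen : ((s.zip s.tail).map (fun p => p.2 - p.1)).length = s.length - 1 := by
    simp [List.length_zip, List.length_tail]
  have hplen : p < ((s.zip s.tail).map (fun p => p.2 - p.1)).length := by omega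
  have hgetp : ((s.zip s.tail).map (fun p => p.2 - p.1))[p] = s[p+1]'(by omega) - s[p]'(by omega) := by
    simp [List.getElem_zip, List.getElem_tail]
  have hmem : (s[p+1]'(by omega) - s[p]'(by omega)) ∈ ((s.zip s.tail).map (fun p => p.2 - p.1)) := by
    rw [← hgetp]; exact List.getElem_mem _
  have h1 : g ≤ s[p+1]'(by omega) - s[p]'(by omega) :=
    PySem.List.min?_isMin hg _ hmem
  have h2 : s[p+1]'(by omega) ≤ s[q] :=
    PySem.List.sorted_id_getElem_mono xs (by omega) (by omega)
  show g ≤ s[q]'(by omega) - s[p]'(by omega)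
  omega

lemma mingap_le_diff (t : List Int) (g : Int)
    (hg : PySem.List.min?
        (((PySem.List.sorted t (fun x => x) false).zip
          (PySem.List.sorted t (fun x => x) false).tail).map (fun p => p.2 - p.1))
        (fun x => x) = some g)
    {x y : Int} (hx : x ∈ PySem.List.sorted t (fun x => x) false)
    (hy : y ∈ PySem.List.sorted t (fun x => x) false) (hxy : x < y) :
    g ≤ y - x := by
  obtain ⟨p, hp, hpx⟩ := List.mem_iff_getElem.mp hx
  obtain ⟨q, hq, hqy⟩ := List.mem_iff_getElem.mp hy
  have hpq : p < q := by
    by_contra hle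
    have hmono := PySem.List.sorted_id_getElem_mono t (p := q) (q := p) (Nat.le_of_not_lt hle) hp
    rw [hpx, hqy] at hmono
    omega
  have h := mingap_le t g hg hpq hq
  rw [hpx, hqy] at h
  exact h

lemma mingap_le_abs (t : List Int) (g : Int)
    (hg : PySem.List.min?
        (((PySem.List.sorted t (fun x => x) false).zip
          (PySem.List.sorted t (fun x => x) false).tail).map (fun p => p.2 - p.1))
        (fun x => x) = some g)
    {i j : ℕ} (hij : i ≠ j) (hi : i < t.length) (hj : j < t.length) :
    g ≤ |t[i] - t[j]| := by
  have hmem : ∀ k (h : k < t.length), t[k] ∈ PySem.List.sorted t (fun x => x) false := fun k h =>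
    (PySem.List.mem_sorted t _ false _).mpr (List.getElem_mem h)
  rcases lt_trichotomy t[i] t[j] with h | h | h
  · have h1 := mingap_le_diff t g hg (hmem i hi) (hmem j hj) h
    have h2 : t[j] - t[i] ≤ |t[i] - t[j]| := by rw [abs_sub_comm]; exact le_abs_self _
    omega
  · have hcnt : 2 ≤ t.count t[i] := by
      rcases Nat.lt_or_ge i j with hij2 | hij2
      · exact two_le_count_of_pair hij2 hj rfl h.symm
      · exact two_le_count_of_pair (show j < i by omega) hi h.symm rfl
    have hcnt_s : 2 ≤ (PySem.List.sorted t (fun x => x) false).count t[i] := by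
      rw [List.Perm.count_eq (PySem.List.sorted_perm t _ false)]; exact hcnt
    obtain ⟨p, q, hpq, hq, hpx, hqx⟩ := exists_pair_of_two_le_count hcnt_s
    have h3 := mingap_le t g hg hpq hq
    rw [hpx, hqx] at h3
    have h4 : |t[i] - t[j]| = 0 := by rw [h]; simp
    omega
  · have h1 := mingap_le_diff t g hg (hmem j hj) (hmem i hi) h
    have h2 : t[i] - t[j] ≤ |t[i] - t[j]| := le_abs_self _
    omega

-- main proof ----------------------------------------------------------------

theorem pizza_cut_spec : Claim_equal_pizza_cut := by
  intro n a _ hpre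
  unfold Spec_pizza_cut
  by_cases hn1 : n ≤ 1
  · rw [show pizza_cut_alt n a = 0 from by simp [pizza_cut_alt, hn1]]
    by_cases hn0 : n ≤ 0
    · unfold pizza_cut
      rw [PySem.List.pyRange_one_eq_nil hn0]
      rfl
    · have hn : n = 1 := by omega
      subst hn
      unfold pizza_cut
      rw [PySem.List.pyRange_one_cons (by norm_num), PySem.List.pyRange_one_eq_nil (by norm_num)]
      simp [pcInner]
  · -- 2 ≤ n; n ≤ len a
    have hn2 : (2:Int) ≤ n := by omega
    have hlen : n ≤ (a.length : Int) := by
      rcases hpre with h | h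
      · omega
      · exact h
    have h0n : (0:Int) ≤ n := by omega
    set t := a.take n.toNat with ht
    have htlen : t.length = n.toNat := by
      rw [ht, List.length_take]; omega
    set s := PySem.List.sorted t (fun x => x) false with hsdef
    have hslen : s.length = n.toNat := by rw [hsdef, PySem.List.length_sorted, htlen]
    have hslen' : (PySem.List.sorted t (fun x => x) false).length = n.toNat := hslen
    have hs2 : 2 ≤ s.length := by omega
    have hslice : PySem.List.slice a none (some n) = t := PySem.List.slice_to a h0n
    have hglen : ((s.zip s.tail).map (fun p => p.2 - p.1)).length = s.length - 1 := by
      simp [List.length_zip, List.length_tail]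
    obtain ⟨g, hg⟩ : ∃ g, PySem.List.min? ((s.zip s.tail).map (fun p => p.2 - p.1)) (fun x => x) = some g := by
      cases hmin : PySem.List.min? ((s.zip s.tail).map (fun p => p.2 - p.1)) (fun x => x) with
      | none =>
          have := (PySem.List.min?_eq_none_iff _ _).mp hmin
          rw [this] at hglen
          simp at hglen
          omega
      | some g => exact ⟨g, rfl⟩
    have halt : pizza_cut_alt n a =
        max (PySem.List.pyGetD s (-1) 0 - PySem.List.pyGetD s 0 0) (360 - g) := by
      simp only [pizza_cut_alt, if_neg hn1, hslice, ← hsdef, hg]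
    have hne : s ≠ [] := by
      intro e
      rw [e] at hs2
      simp at hs2
    have hlast : PySem.List.pyGetD s (-1) 0 = s[s.length - 1]'(by omega) := by
      rw [PySem.List.pyGetD_neg_one s 0 hne, List.getLast_eq_getElem]
    have hzero : PySem.List.pyGetD s 0 0 = s[0]'(by omega) := by
      rw [PySem.List.pyGetD_eq_getElem s 0 le_rfl (by exact_mod_cast by omega)]
      simp
    -- A's array accesses land in t
    have hacc : ∀ (i : Int) (h0 : 0 ≤ i) (h1 : i < n),
        PySem.List.pyGetD a i 0 = t[i.toNat]'(by omega) := by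
      intro i h0 h1
      rw [PySem.List.pyGetD_eq_getElem a 0 h0 (by omega)]
      exact (List.getElem_take).symm
    have hmem_s : ∀ (k : ℕ) (h : k < t.length), t[k] ∈ s := fun k h =>
      (PySem.List.mem_sorted t _ false _).mpr (List.getElem_mem h)
    have hbound : ∀ x ∈ s, s[0]'(by omega) ≤ x ∧ x ≤ s[s.length - 1]'(by omega) := by
      intro x hx
      obtain ⟨k, hk, rfl⟩ := List.mem_iff_getElem.mp hx
      exact ⟨PySem.List.sorted_id_getElem_mono t (Nat.zero_le _) hk,
             PySem.List.sorted_id_getElem_mono t (by omega) (by omega)⟩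
    have hb0 : (0:Int) ≤ max (s[s.length - 1]'(by omega) - s[0]'(by omega)) (360 - g) := by
      have h1 : s[0]'(by omega) ≤ s[s.length - 1]'(by omega) :=
        PySem.List.sorted_id_getElem_mono t (by omega) (by omega)
      have h2 : (0:Int) ≤ s[s.length - 1]'(by omega) - s[0]'(by omega) := by omega
      exact le_trans h2 (le_max_left _ _)
    unfold pizza_cut
    rw [halt, hlast, hzero]
    apply le_antisymm
    · -- upper bound
      apply pc_outer_le a _ _ _ 0 hb0
      intro i hi j hj hji
      obtain ⟨hi0, hin⟩ := PySem.List.mem_pyRange_one.mp hi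
      obtain ⟨hj0, hjn⟩ := PySem.List.mem_pyRange_one.mp hj
      have hiT : i.toNat < t.length := by omega
      have hjT : j.toNat < t.length := by omega
      have hd : pcD a i j = |t[i.toNat] - t[j.toNat]| := by
        unfold pcD
        rw [hacc i hi0 hin, hacc j hj0 hjn]
      have hxs := hmem_s i.toNat hiT
      have hys := hmem_s j.toNat hjT
      obtain ⟨hmx, hxM⟩ := hbound _ hxs
      obtain ⟨hmy, hyM⟩ := hbound _ hys
      constructor
      · refine le_trans ?_ (le_max_left _ _)
        rw [hd]
        exact abs_le.mpr ⟨by omega, by omega⟩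
      · refine le_trans ?_ (le_max_right _ _)
        have hgle : g ≤ |t[i.toNat] - t[j.toNat]| :=
          mingap_le_abs t g hg (by omega) hiT hjT
        rw [hd]
        omega
    · -- lower bound
      apply max_le
      · -- M - m ≤ A
        have hmmem : s[0]'(by omega) ∈ t := (PySem.List.mem_sorted t _ false _).mp (List.getElem_mem _)
        have hMmem : s[s.length - 1]'(by omega) ∈ t := (PySem.List.mem_sorted t _ false _).mp (List.getElem_mem _)
        obtain ⟨pm, hpm, hpmv⟩ := List.mem_iff_getElem.mp hmmem
        obtain ⟨pM, hpM, hpMv⟩ := List.mem_iff_getElem.mp hMmem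
        by_cases hpp : pm = pM
        · -- all endpoints equal: M = m, bound is 0 ≤ pcD(1,0) ≤ A
          subst hpp
          have h01 : (1:Int) ∈ PySem.List.pyRange 0 n := PySem.List.mem_pyRange_one.mpr ⟨by omega, by omega⟩
          have h00 : (0:Int) ∈ PySem.List.pyRange 0 n := PySem.List.mem_pyRange_one.mpr ⟨by omega, by omega⟩
          have helem := (pc_outer_elem a _ _ 0 1 0 h01 h00 (by omega)).1
          have hd0 : (0:Int) ≤ pcD a 1 0 := abs_nonneg _
          omega
        · have hiR : ((pM : Int)) ∈ PySem.List.pyRange 0 n := PySem.List.mem_pyRange_one.mpr ⟨by omega, by omega⟩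
          have hjR : ((pm : Int)) ∈ PySem.List.pyRange 0 n := PySem.List.mem_pyRange_one.mpr ⟨by omega, by omega⟩
          have helem := (pc_outer_elem a _ _ 0 (pM : Int) (pm : Int) hiR hjR (by omega)).1
          have hd : pcD a (pM : Int) (pm : Int) = |t[pM] - t[pm]| := by
            unfold pcD
            rw [hacc _ (by omega) (by omega), hacc _ (by omega) (by omega)]
            simp
          rw [hd, hpmv, hpMv] at helem
          have : s[s.length - 1]'(by omega) - s[0]'(by omega) ≤ |s[s.length - 1]'(by omega) - s[0]'(by omega)| := le_abs_self _
          omega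
      · -- 360 - g ≤ A
        obtain ⟨k, hk, hkg⟩ := List.mem_iff_getElem.mp (PySem.List.min?_mem hg)
        rw [hglen] at hk
        have hkg2 : g = s[k+1]'(by omega) - s[k]'(by omega) := by
          rw [← hkg]
          simp [List.getElem_zip, List.getElem_tail]
        have huw : s[k]'(by omega) ≤ s[k+1]'(by omega) :=
          PySem.List.sorted_id_getElem_mono t (by omega) (by omega)
        by_cases huweq : s[k]'(by omega) = s[k+1]'(by omega)
        · -- g = 0 and a duplicate exists in t
          have hg0 : g = 0 := by omega
          have hcnt_s : 2 ≤ s.count (s[k]'(by omega)) :=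
            two_le_count_of_pair (Nat.lt_succ_self k) (by omega) rfl huweq.symm
          have hcnt_t : 2 ≤ t.count (s[k]'(by omega)) := by
            rw [← List.Perm.count_eq (PySem.List.sorted_perm t (fun x => x) false)]
            exact hcnt_s
          obtain ⟨p, q, hpq, hq, hpx, hqx⟩ := exists_pair_of_two_le_count hcnt_t
          have hiR : ((q : Int)) ∈ PySem.List.pyRange 0 n := PySem.List.mem_pyRange_one.mpr ⟨by omega, by omega⟩
          have hjR : ((p : Int)) ∈ PySem.List.pyRange 0 n := PySem.List.mem_pyRange_one.mpr ⟨by omega, by omega⟩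
          have helem := (pc_outer_elem a _ _ 0 (q : Int) (p : Int) hiR hjR (by omega)).2
          have hd : pcD a (q : Int) (p : Int) = |t[q] - t[p]'(by omega)| := by
            unfold pcD
            rw [hacc _ (by omega) (by omega), hacc _ (by omega) (by omega)]
            simp
          have hdz : |t[q] - t[p]'(by omega)| = 0 := by
            rw [hpx, hqx]; simp
          rw [hd, hdz] at helem
          omega
        · -- u < w: both values occur in t at distinct positions
          have hus : s[k]'(by omega) ∈ t := (PySem.List.mem_sorted t _ false _).mp (List.getElem_mem _)
          have hws : s[k+1]'(by omega) ∈ t := (PySem.List.mem_sorted t _ false _).mp (List.getElem_mem _)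
          obtain ⟨p, hp, hpv⟩ := List.mem_iff_getElem.mp hus
          obtain ⟨q, hq, hqv⟩ := List.mem_iff_getElem.mp hws
          have hpq : p ≠ q := by
            intro e
            subst e
            omega
          have hiR : ((q : Int)) ∈ PySem.List.pyRange 0 n := PySem.List.mem_pyRange_one.mpr ⟨by omega, by omega⟩
          have hjR : ((p : Int)) ∈ PySem.List.pyRange 0 n := PySem.List.mem_pyRange_one.mpr ⟨by omega, by omega⟩
          have helem := (pc_outer_elem a _ _ 0 (q : Int) (p : Int) hiR hjR (by omega)).2
          have hd : pcD a (q : Int) (p : Int) = |t[q] - t[p]| := by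
            unfold pcD
            rw [hacc _ (by omega) (by omega), hacc _ (by omega) (by omega)]
            simp
          have habs : |t[q] - t[p]| = s[k+1]'(by omega) - s[k]'(by omega) := by
            rw [hpv, hqv]
            exact abs_of_nonneg (by omega)
          rw [hd, habs] at helem
          omega
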